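-- pv_equiv track=rewrite | github.com/NCI-RBL/Dockers | recipes/utils/DTEG/densebuilder_main.py | junctlen_for_riboshift
-- ===== SOURCE A (Python) =====
-- def junctlen_for_riboshift(readcigar,riboshift):
-- 	junctnum= 0
-- 	mappedexonlen= 0
-- 	insert= 0
-- 	for x in range(len(readcigar)):
-- 		if readcigar[x][0]== 0:	mappedexonlen+= readcigar[x][1]
-- 		if mappedexonlen-1 < riboshift:	junctnum+= 1
--
-- 	for y in range(junctnum):
-- 		if readcigar[y][0]== 3:	insert+= readcigar[y][1]
--
-- 	return insert
-- ===== SOURCE B (Python) =====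
-- def junctlen_for_riboshift(readcigar, riboshift):
--     # One pass: build a prefix-sum table of op-3 lengths while counting junctnum,
--     # then answer with a single O(1) table lookup instead of a second scan.
--     mappedexonlen = 0
--     junctnum = 0
--     op3sum = 0
--     op3prefix = [0]
--     for op, length in readcigar:
--         if op == 3:
--             op3sum += length
--         op3prefix.append(op3sum)
--         if op == 0:
--             mappedexonlen += length
--         if mappedexonlen - 1 < riboshift:
--             junctnum += 1
--     return op3prefix[junctnum]
-- ===== Notes on version B (the rewrite author's own statement) =====
-- stated objective: alternative
-- what changed: Replaces A's count-then-rescan (a second indexed loop over the first junctnum entries) with a single pass that builds a prefix-sum table of op-3 lengths alongside the count, finishing with one table lookup.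
import Mathlib
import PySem

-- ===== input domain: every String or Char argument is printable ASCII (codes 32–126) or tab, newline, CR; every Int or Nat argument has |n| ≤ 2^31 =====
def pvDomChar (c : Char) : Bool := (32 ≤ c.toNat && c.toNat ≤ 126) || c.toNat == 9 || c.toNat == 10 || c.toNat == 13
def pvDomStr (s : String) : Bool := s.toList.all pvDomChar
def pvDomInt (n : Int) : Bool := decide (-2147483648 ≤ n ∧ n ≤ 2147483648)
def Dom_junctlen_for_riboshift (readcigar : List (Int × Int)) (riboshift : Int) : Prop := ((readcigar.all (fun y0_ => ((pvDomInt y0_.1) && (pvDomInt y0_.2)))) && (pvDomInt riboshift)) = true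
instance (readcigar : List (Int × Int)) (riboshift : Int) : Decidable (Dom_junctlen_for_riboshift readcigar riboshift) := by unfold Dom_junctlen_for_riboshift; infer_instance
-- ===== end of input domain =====

-- B builds a prefix-sum table of op-3 lengths in the same pass that counts junctnum
-- and answers with one table lookup, instead of A's second indexed rescan. (objective: alternative)

-- ===== PORT A =====
-- body of A's first loop (mappedexonlen update, then junctnum update); state (junctnum, mappedexonlen)
def pvStepA (riboshift : Int) (st : Int × Int) (e : Int × Int) : Int × Int :=
  let m := if e.1 = 0 then st.2 + e.2 else st.2
  (if m - 1 < riboshift then st.1 + 1 else st.1, m)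

-- body of A's second loop (insert accumulation)
def pvStep3 (ins : Int) (e : Int × Int) : Int :=
  if e.1 = 3 then ins + e.2 else ins

def junctlen_for_riboshift (readcigar : List (Int × Int)) (riboshift : Int) : Int :=
  let s := (PySem.List.pyRange 0 (readcigar.length : Int) 1).foldl
    (fun st x => pvStepA riboshift st (PySem.List.pyGetD readcigar x (0, 0))) (0, 0)
  (PySem.List.pyRange 0 s.1 1).foldl
    (fun ins y => pvStep3 ins (PySem.List.pyGetD readcigar y (0, 0))) 0

-- ===== PORT B =====
-- body of B's single loop; state (mappedexonlen, junctnum, op3sum, op3prefix)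
def pvStepB (riboshift : Int) (st : Int × Int × Int × List Int) (e : Int × Int) :
    Int × Int × Int × List Int :=
  let s := if e.1 = 3 then st.2.2.1 + e.2 else st.2.2.1
  let p := st.2.2.2 ++ [s]
  let m := if e.1 = 0 then st.1 + e.2 else st.1
  let j := if m - 1 < riboshift then st.2.1 + 1 else st.2.1
  (m, j, s, p)

def junctlen_for_riboshift_alt (readcigar : List (Int × Int)) (riboshift : Int) : Int :=
  let st := readcigar.foldl (pvStepB riboshift) (0, 0, 0, [0])
  -- op3prefix[junctnum]: always in range since junctnum ≤ len(readcigar) = len(op3prefix) - 1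
  PySem.List.pyGetD st.2.2.2 st.2.1 0

-- ===== PRECONDITION & SPEC =====
def Spec_junctlen_for_riboshift (readcigar : List (Int × Int)) (riboshift : Int) (out : Int) : Prop := out = junctlen_for_riboshift_alt readcigar riboshift
instance (readcigar : List (Int × Int)) (riboshift : Int) (out : Int) : Decidable (Spec_junctlen_for_riboshift readcigar riboshift out) := by unfold Spec_junctlen_for_riboshift; infer_instance

-- ===== CLAIM (what is proved, stated in full; the proofs are below) =====
def Claim_equal_junctlen_for_riboshift : Prop := ∀ (readcigar : List (Int × Int)) (riboshift : Int), Dom_junctlen_for_riboshift readcigar riboshift → Spec_junctlen_for_riboshift readcigar riboshift (junctlen_for_riboshift readcigar riboshift)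

-- ===== LEMMAS AND PROOFS =====

-- partial sums of op-3 lengths (the tail of B's op3prefix list)
def pvOp3scan : List (Int × Int) → Int → List Int
  | [], _ => []
  | e :: t, s => (if e.1 = 3 then s + e.2 else s) :: pvOp3scan t (if e.1 = 3 then s + e.2 else s)

-- B's fold tracks A's first-loop state: fst = mappedexonlen, snd.fst = junctnum
theorem pvB_tracks_A (rib : Int) : ∀ (l : List (Int × Int)) (m j s : Int) (P : List Int),
    (l.foldl (pvStepB rib) (m, j, s, P)).1 = (l.foldl (pvStepA rib) (j, m)).2 ∧
    (l.foldl (pvStepB rib) (m, j, s, P)).2.1 = (l.foldl (pvStepA rib) (j, m)).1 := by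
  intro l
  induction l with
  | nil => intro m j s P; exact ⟨rfl, rfl⟩
  | cons e t ih =>
    intro m j s P
    simp only [List.foldl_cons, pvStepA, pvStepB]
    exact ih _ _ _ _

-- B's fold accumulates the prefix-sum table
theorem pvB_prefix (rib : Int) : ∀ (l : List (Int × Int)) (m j s : Int) (P : List Int),
    (l.foldl (pvStepB rib) (m, j, s, P)).2.2.2 = P ++ pvOp3scan l s := by
  intro l
  induction l with
  | nil => intro m j s P; simp [pvOp3scan]
  | cons e t ih =>
    intro m j s P
    simp only [List.foldl_cons, pvStepB, pvOp3scan]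
    rw [ih]
    simp

-- entry k of the scan = fold of pvStep3 over the first k+1 entries
theorem pvOp3scan_getElem? : ∀ (l : List (Int × Int)) (s : Int) (k : Nat), k < l.length →
    (pvOp3scan l s)[k]? = some ((l.take (k + 1)).foldl pvStep3 s) := by
  intro l
  induction l with
  | nil => intro s k h; simp at h
  | cons e t ih =>
    intro s k h
    cases k with
    | zero => simp [pvOp3scan, pvStep3]
    | succ k =>
      simp only [pvOp3scan, List.getElem?_cons_succ, List.take_succ_cons, List.foldl_cons]
      rw [ih _ k (by simpa using h)]
      simp [pvStep3]

-- junctnum stays between its start and start + number of entries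
theorem pvJ_bounds (rib : Int) : ∀ (l : List (Int × Int)) (j m : Int),
    j ≤ (l.foldl (pvStepA rib) (j, m)).1 ∧
    (l.foldl (pvStepA rib) (j, m)).1 ≤ j + l.length := by
  intro l
  induction l with
  | nil => intro j m; simp
  | cons e t ih =>
    intro j m
    simp only [List.foldl_cons, pvStepA, List.length_cons]
    have h := ih (if (if e.1 = 0 then m + e.2 else m) - 1 < rib then j + 1 else j)
      (if e.1 = 0 then m + e.2 else m)
    split_ifs at h ⊢ <;> push_cast <;> omega

-- A's second loop over range(j) with indexing = a fold over the first j entries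
theorem pvRange_fold_take (xs : List (Int × Int)) (j : Nat) (hj : j ≤ xs.length) (init : Int) :
    (PySem.List.pyRange 0 (j : Int) 1).foldl
      (fun ins y => pvStep3 ins (PySem.List.pyGetD xs y (0, 0))) init
    = (xs.take j).foldl pvStep3 init := by
  have hlen : ((xs.take j).length : Int) = (j : Int) := by simp [Nat.min_eq_left hj]
  have hcong : (PySem.List.pyRange 0 (j : Int) 1).foldl
      (fun ins y => pvStep3 ins (PySem.List.pyGetD xs y (0, 0))) init
      = (PySem.List.pyRange 0 (j : Int) 1).foldl
      (fun ins y => pvStep3 ins (PySem.List.pyGetD (xs.take j) y (0, 0))) init := by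
    apply PySem.List.foldl_congr_mem
    intro acc y hy
    obtain ⟨h0, hyj⟩ := (PySem.List.mem_pyRange_one).1 hy
    lift y to ℕ using h0 with k
    have hk : k < j := by exact_mod_cast hyj
    congr 1
    rw [PySem.List.pyGetD_natCast, PySem.List.pyGetD_natCast]
    simp [List.getD, hk]
  rw [hcong, ← hlen, PySem.List.foldl_pyRange_zero_pyGetD' (xs.take j) (0, 0) pvStep3 init]

-- B's op3prefix at index k = fold of pvStep3 over the first k entries
theorem pvPrefix_getD (l : List (Int × Int)) (k : Nat) (hk : k ≤ l.length) :
    PySem.List.pyGetD (0 :: pvOp3scan l 0) ((k : Nat) : Int) 0 = (l.take k).foldl pvStep3 0 := by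
  rw [PySem.List.pyGetD_natCast]
  cases k with
  | zero => simp
  | succ k =>
    have h := pvOp3scan_getElem? l 0 k (by omega)
    simp only [List.getD, List.getElem?_cons_succ, h, Option.getD_some]

-- ===== VERDICT (by name: the statement is the Claim_ definition above) =====
theorem junctlen_for_riboshift_spec : Claim_equal_junctlen_for_riboshift := by
  intro readcigar riboshift _
  show _ = _
  simp only [junctlen_for_riboshift, junctlen_for_riboshift_alt]
  rw [PySem.List.foldl_pyRange_zero_pyGetD' readcigar (0, 0) (pvStepA riboshift) (0, 0)]
  set st := readcigar.foldl (pvStepA riboshift) (0, 0) with hst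
  have htrack := pvB_tracks_A riboshift readcigar 0 0 0 [0]
  have hpre := pvB_prefix riboshift readcigar 0 0 0 [0]
  have hb := pvJ_bounds riboshift readcigar 0 0
  rw [← hst] at htrack hb
  have hjlen : st.1 ≤ (readcigar.length : Int) := by omega
  have hjnat : st.1 = ((st.1.toNat : Nat) : Int) := by omega
  rw [htrack.2, hpre]
  have hP : ([0] : List Int) ++ pvOp3scan readcigar 0 = 0 :: pvOp3scan readcigar 0 := by simp
  rw [hP, hjnat, pvRange_fold_take readcigar st.1.toNat (by omega) 0,
      pvPrefix_getD readcigar st.1.toNat (by omega)]
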